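-- pv_equiv track=rewrite | github.com/sldmxm/AdventOfCode | 2024/07.py | fast_solve
-- ===== SOURCE A (Python) =====
-- def fast_solve(rows: list[list[int]]) -> (int, int):
--     def fast_check(goal, nums, concatenation):
--         def is_concatenated(big_num, small_num):
--             big_num, small_num = str(big_num), str(small_num)
--             return big_num[-len(small_num):] == small_num
--
--         def deconcatenation(big_num, small_num):
--             big_num, small_num = str(big_num), str(small_num)
--             return int(big_num[:-len(small_num)])
--
--         def _helper(cur_goal, cur_nums):
--             if len(cur_nums) == 1:
--                 return (
--                     cur_goal == cur_nums[0]
--                     or cur_goal - cur_nums[0] == 0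
--                 )
--
--             return (
--                     cur_goal % cur_nums[-1] == 0
--                     and _helper(cur_goal // cur_nums[-1], cur_nums[:-1])
--
--                     or _helper(cur_goal - cur_nums[-1], cur_nums[:-1])
--
--                     or concatenation and is_concatenated(cur_goal, cur_nums[-1])
--                     and _helper(deconcatenation(cur_goal, cur_nums[-1]), cur_nums[:-1])
--             )
--
--         return _helper(goal, nums)
--
--     solve1 = solve2 = 0
--     for result, *parts in rows:
--         if fast_check(result, parts, False):
--             solve1 += result
--             solve2 += result
--         elif fast_check(result, parts, True):
--             solve2 += result
--     return solve1, solve2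
-- ===== SOURCE B (Python) =====
-- def fast_solve(rows):
--     def can_make(goal, nums, concatenation):
--         # breadth-wise backward reachability: one deduplicated frontier of
--         # candidate values instead of depth-first backtracking
--         frontier = {goal}
--         for num in reversed(nums[1:]):
--             nxt = set()
--             for g in frontier:
--                 if num != 0 and g % num == 0:
--                     nxt.add(g // num)
--                 nxt.add(g - num)
--                 if concatenation:
--                     gs, ns = str(g), str(num)
--                     if gs[-len(ns):] == ns:
--                         try:
--                             nxt.add(int(gs[:-len(ns)]))
--                         except ValueError:
--                             pass
--             frontier = nxt
--         return nums[0] in frontier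
--
--     solve1 = solve2 = 0
--     for result, *parts in rows:
--         if can_make(result, parts, False):
--             solve1 += result
--             solve2 += result
--         elif can_make(result, parts, True):
--             solve2 += result
--     return solve1, solve2
-- ===== Notes on version B (the rewrite author's own statement) =====
-- stated objective: alternative
-- what changed: Replaces A's depth-first backtracking recursion (with Python's and/or short-circuiting) by an iterative level-by-level solver that carries one deduplicated set of backward-reachable candidate values per position; Pre_ excludes the inputs where A raises (rows shorter than 2, a 0 among the operands after the first, and rows that are unsolvable without concatenation and whose concatenation run reaches a state that makes deconcatenation call int('') or int('-') before any safely-reached success).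
-- outside the precondition, e.g. on fast_solve([[-12, 1, 1, 1, -1]]): A returns (0, -12), B returns (0, -12)
import Mathlib
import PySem

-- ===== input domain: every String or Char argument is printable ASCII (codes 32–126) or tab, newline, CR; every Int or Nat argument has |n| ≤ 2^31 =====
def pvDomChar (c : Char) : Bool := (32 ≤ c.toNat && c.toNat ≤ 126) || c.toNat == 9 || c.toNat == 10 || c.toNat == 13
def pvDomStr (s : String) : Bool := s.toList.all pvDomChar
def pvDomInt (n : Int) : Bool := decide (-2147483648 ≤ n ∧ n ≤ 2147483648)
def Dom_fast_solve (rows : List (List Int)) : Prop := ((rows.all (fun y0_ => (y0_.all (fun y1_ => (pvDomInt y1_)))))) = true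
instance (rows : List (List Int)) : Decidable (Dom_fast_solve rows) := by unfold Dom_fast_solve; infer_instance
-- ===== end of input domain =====

-- B replaces A's depth-first and/or-short-circuit backtracking by an iterative
-- breadth-wise solver keeping one deduplicated set of backward-reachable values
-- per position (a different algorithm of similar worst-case cost).

-- ===== PORT A =====
-- is_concatenated(big_num, small_num): str suffix test big[-len(small):] == small
def pvIsConcatenated (big small : Int) : Bool :=
  let b := PySem.Int.toChars big
  let s := PySem.Int.toChars small
  PySem.List.slice b (some (-(s.length : Int))) none == s

-- deconcatenation(big_num, small_num) = int(str(big)[:-len(str(small))]); none = ValueError (int('') / int('-'))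
def pvDeconcatenation? (big small : Int) : Option Int :=
  let b := PySem.Int.toChars big
  let s := PySem.Int.toChars small
  PySem.Int.ofChars? (PySem.List.slice b none (some (-(s.length : Int))))

-- _helper(cur_goal, cur_nums); none = the Python raises there
-- ([] → IndexError on cur_nums[-1]; % 0 → ZeroDivisionError; deconcatenation ValueError)
def pvHelperA (C : Bool) (g : Int) (nums : List Int) : Option Bool :=
  match nums with
  | [] => none
  | [n0] => some (decide (g = n0) || decide (g - n0 = 0))
  | n0 :: n1 :: rest =>
    let last := PySem.List.pyGetD (n0 :: n1 :: rest) (-1) 0   -- cur_nums[-1]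
    let init := PySem.List.slice (n0 :: n1 :: rest) none (some (-1))  -- cur_nums[:-1]
    match PySem.Int.mod? g last with
    | none => none
    | some m =>
      (if m = 0 then pvHelperA C (PySem.Int.floordiv g last) init else some false).bind fun b1 =>
      if b1 then some true else
      (pvHelperA C (g - last) init).bind fun b2 =>
      if b2 then some true else
      if C then
        if pvIsConcatenated g last then
          match pvDeconcatenation? g last with
          | none => none
          | some v => pvHelperA C v init
        else some false
      else some false
termination_by nums.length
decreasing_by all_goals simp [PySem.List.slice_to_neg_one, List.dropLast_cons₂]

def fast_solve (rows : List (List Int)) : Int × Int :=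
  rows.foldl (fun (s : Int × Int) row =>
    match row with
    | [] => s           -- Python: unpacking raises ValueError (outside Pre_)
    | result :: parts =>
      match pvHelperA false result parts with
      | some true => (s.1 + result, s.2 + result)
      | some false =>
        match pvHelperA true result parts with
        | some true => (s.1, s.2 + result)
        | _ => s        -- none: Python raised (outside Pre_)
      | _ => s) (0, 0)  -- none: Python raised (outside Pre_)

-- ===== PORT B =====
-- body of B's inner 'for g in frontier' loop: the candidates added for one g
def pvNxtAdd (C : Bool) (num : Int) (nxt : PySem.Set Int) (g : Int) : PySem.Set Int :=
  let nxt := if num != 0 && (PySem.Int.mod g num == 0) then nxt.add (PySem.Int.floordiv g num) else nxt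
  let nxt := nxt.add (g - num)
  let nxt := if C then
      let gs := PySem.Int.toChars g
      let ns := PySem.Int.toChars num
      if PySem.List.slice gs (some (-(ns.length : Int))) none == ns then
        match PySem.Int.ofChars? (PySem.List.slice gs none (some (-(ns.length : Int)))) with
        | some v => nxt.add v
        | none => nxt        -- except ValueError: pass
      else nxt
    else nxt
  nxt

-- can_make(goal, nums, concatenation)
def pvCanMake (C : Bool) (goal : Int) (nums : List Int) : Bool :=
  let frontier : PySem.Set Int := PySem.Set.ofList [goal]
  let final := ((PySem.List.slice nums (some 1) none).reverse).foldl
    (fun (fr : PySem.Set Int) num => fr.foldl (pvNxtAdd C num) PySem.Set.empty) frontier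
  match nums with
  | [] => false            -- Python: nums[0] raises IndexError (outside Pre_)
  | n0 :: _ => final.contains n0

def fast_solve_alt (rows : List (List Int)) : Int × Int :=
  rows.foldl (fun (s : Int × Int) row =>
    match row with
    | [] => s              -- Python: unpacking raises ValueError (outside Pre_)
    | result :: parts =>
      if pvCanMake false result parts then (s.1 + result, s.2 + result)
      else if pvCanMake true result parts then (s.1, s.2 + result)
      else s) (0, 0)

-- ===== PRECONDITION & SPEC =====
-- values backward-reachable from g by un-doing one operator insertion of num (both operator sets)
def pvPreds (num g : Int) : List Int :=
  (if num ≠ 0 ∧ PySem.Int.mod g num = 0 then [PySem.Int.floordiv g num] else []) ++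
  [g - num] ++
  (let gs := PySem.Int.toChars g
   let ns := PySem.Int.toChars num
   if PySem.List.slice gs (some (-(ns.length : Int))) none = ns then
     match PySem.Int.ofChars? (PySem.List.slice gs none (some (-(ns.length : Int)))) with
     | some v => [v]
     | none => []
   else [])

-- candidate values one un-done operator insertion of num away from g (concatenation only if C)
def pvBPreds (C : Bool) (num g : Int) : List Int :=
  (if num ≠ 0 ∧ PySem.Int.mod g num = 0 then [PySem.Int.floordiv g num] else []) ++
  [g - num] ++
  (if C then
    (let gs := PySem.Int.toChars g
     let ns := PySem.Int.toChars num
     if PySem.List.slice gs (some (-(ns.length : Int))) none = ns then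
       match PySem.Int.ofChars? (PySem.List.slice gs none (some (-(ns.length : Int)))) with
       | some v => [v]
       | none => []
     else [])
   else [])

-- x is makeable from g by un-doing the operator list ds (goal value g, first operand x)
def pvReach (C : Bool) : List Int → Int → Int → Bool
  | [], g, x => g == x
  | d :: ds, g, x => (pvBPreds C d g).any (fun y => pvReach C ds y x)

-- the state on which A's deconcatenation would call int('') / int('-') (ValueError)
def pvCrash (g num : Int) : Bool :=
  let gs := PySem.Int.toChars g
  let ns := PySem.Int.toChars num
  (PySem.List.slice gs (some (-(ns.length : Int))) none == ns) &&
  (PySem.Int.ofChars? (PySem.List.slice gs none (some (-(ns.length : Int))))).isNone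

-- no backward-reachable state at all hits a ValueError deconcatenation
def pvSafe : List Int → List Int → Bool
  | _, [] => true
  | fr, d :: ds => fr.all (fun g => !pvCrash g d) && pvSafe (fr.flatMap (pvPreds d)) ds

-- A's recursion checks the crash pair (g, d) only after its ÷ and − children: the
-- crash is dodged ('excused') when one of those children succeeds through an
-- entirely crash-free subtree, every earlier-evaluated subtree being crash-free too
def pvExcuse (n0 g d : Int) (ds : List Int) : Bool :=
  ((PySem.Int.mod g d == 0) && pvReach true ds (PySem.Int.floordiv g d) n0 &&
     pvSafe [PySem.Int.floordiv g d] ds) ||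
  ((!(PySem.Int.mod g d == 0) || pvSafe [PySem.Int.floordiv g d] ds) &&
     pvReach true ds (g - d) n0 && pvSafe [g - d] ds)

-- the concatenation run returns (no ValueError): every crash pair met is excused
def pvSafeT (n0 : Int) : List Int → List Int → Bool
  | _, [] => true
  | fr, d :: ds => fr.all (fun g => !pvCrash g d || pvExcuse n0 g d ds) &&
      pvSafeT n0 (fr.flatMap (pvPreds d)) ds

-- Pre_ excludes exactly the inputs on which A raises (slightly conservatively):
-- rows shorter than 2 (unpacking ValueError / IndexError), a 0 among the
-- operands after the first (ZeroDivisionError — A's recursion evaluates every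
-- '%'), and rows unsolvable without concatenation (so the elif enters the
-- concatenation run) in which a backward-reachable state makes deconcatenation
-- call int('') or int('-') (ValueError) without being excused by an earlier
-- crash-free success branch.
def Pre_fast_solve (rows : List (List Int)) : Prop :=
  (rows.all (fun row =>
    match row with
    | result :: p1 :: ps =>
      ps.all (fun p => p != 0) &&
      (pvReach false ps.reverse result p1 || pvSafeT p1 [result] ps.reverse)
    | _ => false)) = true
instance (rows : List (List Int)) : Decidable (Pre_fast_solve rows) := by unfold Pre_fast_solve; infer_instance

def pvWitness_fast_solve : List (List Int) := [[190, 10, 19], [3267, 81, 40, 27], [83, 17, 5]]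

def Spec_fast_solve (rows : List (List Int)) (out : Int × Int) : Prop := out = fast_solve_alt rows
instance (rows : List (List Int)) (out : Int × Int) : Decidable (Spec_fast_solve rows out) := by unfold Spec_fast_solve; infer_instance

-- ===== CLAIM (what is proved, stated in full; the proofs are below) =====
def Claim_equal_fast_solve : Prop := ∀ (rows : List (List Int)), Dom_fast_solve rows → Pre_fast_solve rows → Spec_fast_solve rows (fast_solve rows)

-- ===== LEMMAS AND PROOFS =====

lemma pvSafe_mono : ∀ (ds fr fr' : List Int), (∀ x ∈ fr', x ∈ fr) → pvSafe fr ds = true → pvSafe fr' ds = true := by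
  intro ds
  induction ds with
  | nil => intro _ _ _ _; rfl
  | cons d ds ih =>
    intro fr fr' hsub h
    simp only [pvSafe, Bool.and_eq_true, List.all_eq_true] at h ⊢
    refine ⟨fun g hg => h.1 g (hsub g hg), ih _ _ ?_ h.2⟩
    intro x hx
    simp only [List.mem_flatMap] at hx ⊢
    obtain ⟨g, hg, hx⟩ := hx
    exact ⟨g, hsub g hg, hx⟩

lemma pvSafeT_mono (n0 : Int) : ∀ (ds fr fr' : List Int), (∀ x ∈ fr', x ∈ fr) → pvSafeT n0 fr ds = true → pvSafeT n0 fr' ds = true := by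
  intro ds
  induction ds with
  | nil => intro _ _ _ _; rfl
  | cons d ds ih =>
    intro fr fr' hsub h
    simp only [pvSafeT, Bool.and_eq_true, List.all_eq_true] at h ⊢
    refine ⟨fun g hg => h.1 g (hsub g hg), ih _ _ ?_ h.2⟩
    intro x hx
    simp only [List.mem_flatMap] at hx ⊢
    obtain ⟨g, hg, hx⟩ := hx
    exact ⟨g, hsub g hg, hx⟩

set_option maxHeartbeats 1000000 in
lemma mem_pvNxtAdd (C : Bool) (num : Int) (nxt : PySem.Set Int) (g x : Int) :
    x ∈ pvNxtAdd C num nxt g ↔ x ∈ nxt ∨ x ∈ pvBPreds C num g := by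
  have e1 : (num != 0 && (PySem.Int.mod g num == 0)) = decide (num ≠ 0 ∧ PySem.Int.mod g num = 0) := by
    by_cases h : num = 0 <;> by_cases h' : PySem.Int.mod g num = 0 <;> simp [h, h']
  have e2 : (PySem.List.slice (PySem.Int.toChars g) (some (-((PySem.Int.toChars num).length : Int))) none == PySem.Int.toChars num)
      = decide (PySem.List.slice (PySem.Int.toChars g) (some (-((PySem.Int.toChars num).length : Int))) none = PySem.Int.toChars num) := by
    by_cases h : PySem.List.slice (PySem.Int.toChars g) (some (-((PySem.Int.toChars num).length : Int))) none = PySem.Int.toChars num <;> simp [h]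
  simp only [pvNxtAdd, pvBPreds, e1, e2]
  split_ifs with h1 h2 <;> cases C <;> (try split) <;>
    simp_all [PySem.Set.mem_add, or_assoc]

lemma mem_foldl_pvNxtAdd (C : Bool) (num : Int) :
    ∀ (fr : List Int) (init : PySem.Set Int) (x : Int),
    x ∈ fr.foldl (pvNxtAdd C num) init ↔ x ∈ init ∨ ∃ g ∈ fr, x ∈ pvBPreds C num g := by
  intro fr
  induction fr with
  | nil => intro init x; simp
  | cons a t ih =>
    intro init x
    simp only [List.foldl_cons, ih, mem_pvNxtAdd, List.mem_cons]
    constructor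
    · rintro (( h | h) | ⟨g, hg, h⟩)
      · exact Or.inl h
      · exact Or.inr ⟨a, Or.inl rfl, h⟩
      · exact Or.inr ⟨g, Or.inr hg, h⟩
    · rintro (h | ⟨g, (rfl | hg), h⟩)
      · exact Or.inl (Or.inl h)
      · exact Or.inl (Or.inr h)
      · exact Or.inr ⟨g, hg, h⟩

lemma mem_frontier (C : Bool) :
    ∀ (ds : List Int) (fr : PySem.Set Int) (x : Int),
    (x ∈ ds.foldl (fun (fr : PySem.Set Int) num => fr.foldl (pvNxtAdd C num) PySem.Set.empty) fr)
      ↔ ∃ g ∈ fr, pvReach C ds g x = true := by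
  intro ds
  induction ds with
  | nil => intro fr x; simp [pvReach]
  | cons d ds ih =>
    intro fr x
    simp only [List.foldl_cons, ih, pvReach, List.any_eq_true]
    constructor
    · rintro ⟨g', hg', hr⟩
      rw [mem_foldl_pvNxtAdd] at hg'
      rcases hg' with h | ⟨g, hg, hp⟩
      · simp [PySem.Set.empty] at h
      · exact ⟨g, hg, ⟨g', hp, hr⟩⟩
    · rintro ⟨g, hg, ⟨y, hy, hr⟩⟩
      refine ⟨y, ?_, hr⟩
      rw [mem_foldl_pvNxtAdd]
      exact Or.inr ⟨g, hg, hy⟩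

lemma pvCanMake_eq_reach (C : Bool) (goal n0 : Int) (tail : List Int) :
    pvCanMake C goal (n0 :: tail) = pvReach C tail.reverse goal n0 := by
  have h := mem_frontier C tail.reverse (PySem.Set.ofList [goal]) n0
  simp only [PySem.Set.mem_ofList, List.mem_singleton, exists_eq_left] at h
  simp only [pvCanMake, PySem.List.slice_from_one, List.tail_cons]
  cases hr : pvReach C tail.reverse goal n0
  · simp [hr] at h
    simp [h]
  · simp [hr] at h
    simp [h]

lemma pvHelperA_concat (C : Bool) (g last : Int) (init : List Int) (h : init ≠ []) :
    pvHelperA C g (init ++ [last]) =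
      match PySem.Int.mod? g last with
      | none => none
      | some m =>
        (if m = 0 then pvHelperA C (PySem.Int.floordiv g last) init else some false).bind fun b1 =>
        if b1 then some true else
        (pvHelperA C (g - last) init).bind fun b2 =>
        if b2 then some true else
        if C then
          if pvIsConcatenated g last then
            match pvDeconcatenation? g last with
            | none => none
            | some v => pvHelperA C v init
          else some false
        else some false := by
  match init, h with
  | [a], _ =>
    have e1 : PySem.List.pyGetD [a, last] (-1) 0 = last :=
      PySem.List.pyGetD_neg_one_append_singleton [a] last 0
    have e2 : PySem.List.slice [a, last] none (some (-1)) = [a] := by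
      rw [PySem.List.slice_to_neg_one]; rfl
    rw [show [a] ++ [last] = [a, last] from rfl]
    conv_lhs => rw [pvHelperA.eq_def]
    dsimp only
    rw [e1, e2]
  | a :: b :: t, _ =>
    have e : (a :: b :: t) ++ [last] = a :: b :: (t ++ [last]) := rfl
    rw [e]
    conv_lhs => rw [pvHelperA]
    have e1 : PySem.List.pyGetD (a :: b :: (t ++ [last])) (-1) 0 = last := by
      rw [show a :: b :: (t ++ [last]) = (a :: b :: t) ++ [last] from rfl]
      exact PySem.List.pyGetD_neg_one_append_singleton _ _ _
    have e2 : PySem.List.slice (a :: b :: (t ++ [last])) none (some (-1)) = a :: b :: t := by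
      rw [PySem.List.slice_to_neg_one,
        show a :: b :: (t ++ [last]) = (a :: b :: t) ++ [last] from rfl,
        List.dropLast_concat]
    rw [e1, e2]

-- fully crash-free subtree: A's _helper returns, any C (used for excused children)
lemma pvHelperA_eq_reach (C : Bool) :
    ∀ (ds : List Int) (g n0 : Int),
    (ds.all fun d => d != 0) = true → pvSafe [g] ds = true →
    pvHelperA C g (n0 :: ds.reverse) = some (pvReach C ds g n0) := by
  intro ds
  induction ds with
  | nil =>
    intro g n0 _ _
    rw [show (([] : List Int).reverse) = [] from rfl]
    conv_lhs => rw [pvHelperA.eq_def]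
    dsimp only
    simp only [pvReach]
    by_cases h : g = n0
    · simp [h]
    · simp [h, sub_eq_zero]
  | cons d ds ih =>
    intro g n0 hall hsafe
    simp only [List.all_cons, Bool.and_eq_true] at hall
    obtain ⟨hd0, hall'⟩ := hall
    have hd : d ≠ 0 := by simpa using hd0
    simp only [pvSafe, Bool.and_eq_true, List.all_eq_true, List.mem_singleton,
      forall_eq, Bool.not_eq_true'] at hsafe
    obtain ⟨hncg, hsafe'⟩ := hsafe
    rw [show ([g].flatMap (pvPreds d)) = pvPreds d g by simp] at hsafe'
    have hsafeMem : ∀ y ∈ pvPreds d g, pvSafe [y] ds = true := by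
      intro y hy
      refine pvSafe_mono ds (pvPreds d g) [y] ?_ hsafe'
      intro x hx; simp only [List.mem_singleton] at hx; exact hx ▸ hy
    rw [show (d :: ds).reverse = ds.reverse ++ [d] by simp,
      show n0 :: (ds.reverse ++ [d]) = (n0 :: ds.reverse) ++ [d] from rfl,
      pvHelperA_concat C g d (n0 :: ds.reverse) (by simp)]
    have hmod : PySem.Int.mod? g d = some (PySem.Int.mod g d) := by
      simp [PySem.Int.mod?, PySem.Int.mod, hd]
    rw [hmod]
    have hsub : pvHelperA C (g - d) (n0 :: ds.reverse) = some (pvReach C ds (g - d) n0) :=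
      ih (g - d) n0 hall' (hsafeMem _ (by simp [pvPreds]))
    simp only [pvCrash] at hncg
    simp only [pvReach, pvBPreds]
    by_cases hm : PySem.Int.mod g d = 0
    · have hdiv : pvHelperA C (PySem.Int.floordiv g d) (n0 :: ds.reverse)
          = some (pvReach C ds (PySem.Int.floordiv g d) n0) :=
        ih _ n0 hall' (hsafeMem _ (by simp [pvPreds, hd, hm]))
      by_cases hic : PySem.List.slice (PySem.Int.toChars g)
          (some (-((PySem.Int.toChars d).length : Int))) none = PySem.Int.toChars d
      · rcases hde : PySem.Int.ofChars? (PySem.List.slice (PySem.Int.toChars g) none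
            (some (-((PySem.Int.toChars d).length : Int)))) with _ | v
        · exfalso
          rw [hic] at hncg
          simp [hde] at hncg
        · have hv : pvHelperA C v (n0 :: ds.reverse) = some (pvReach C ds v n0) :=
            ih v n0 hall' (hsafeMem _ (by simp [pvPreds, hic, hde]))
          cases hr1 : pvReach C ds (PySem.Int.floordiv g d) n0 <;>
          cases hr2 : pvReach C ds (g - d) n0 <;>
          cases hr3 : pvReach C ds v n0 <;>
          cases C <;>
            simp [pvIsConcatenated, pvDeconcatenation?, hic, hde, hdiv, hsub, hv, hd, hm,
              hr1, hr2, hr3]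
      · cases hr1 : pvReach C ds (PySem.Int.floordiv g d) n0 <;>
        cases hr2 : pvReach C ds (g - d) n0 <;>
        cases C <;>
          simp [pvIsConcatenated, hic, hdiv, hsub, hd, hm, hr1, hr2]
    · by_cases hic : PySem.List.slice (PySem.Int.toChars g)
          (some (-((PySem.Int.toChars d).length : Int))) none = PySem.Int.toChars d
      · rcases hde : PySem.Int.ofChars? (PySem.List.slice (PySem.Int.toChars g) none
            (some (-((PySem.Int.toChars d).length : Int)))) with _ | v
        · exfalso
          rw [hic] at hncg
          simp [hde] at hncg
        · have hv : pvHelperA C v (n0 :: ds.reverse) = some (pvReach C ds v n0) :=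
            ih v n0 hall' (hsafeMem _ (by simp [pvPreds, hic, hde]))
          cases hr2 : pvReach C ds (g - d) n0 <;>
          cases hr3 : pvReach C ds v n0 <;>
          cases C <;>
            simp [pvIsConcatenated, pvDeconcatenation?, hic, hde, hsub, hv, hd, hm,
              hr2, hr3]
      · cases hr2 : pvReach C ds (g - d) n0 <;>
        cases C <;>
          simp [pvIsConcatenated, hic, hsub, hd, hm, hr2]

-- the C = false run never raises once zeros are excluded: no safety hypothesis
lemma pvHelperA_false_eq_reach :
    ∀ (ds : List Int) (g n0 : Int),
    (ds.all fun d => d != 0) = true →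
    pvHelperA false g (n0 :: ds.reverse) = some (pvReach false ds g n0) := by
  intro ds
  induction ds with
  | nil =>
    intro g n0 _
    rw [show (([] : List Int).reverse) = [] from rfl]
    conv_lhs => rw [pvHelperA.eq_def]
    dsimp only
    simp only [pvReach]
    by_cases h : g = n0
    · simp [h]
    · simp [h, sub_eq_zero]
  | cons d ds ih =>
    intro g n0 hall
    simp only [List.all_cons, Bool.and_eq_true] at hall
    obtain ⟨hd0, hall'⟩ := hall
    have hd : d ≠ 0 := by simpa using hd0
    rw [show (d :: ds).reverse = ds.reverse ++ [d] by simp,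
      show n0 :: (ds.reverse ++ [d]) = (n0 :: ds.reverse) ++ [d] from rfl,
      pvHelperA_concat false g d (n0 :: ds.reverse) (by simp)]
    have hmod : PySem.Int.mod? g d = some (PySem.Int.mod g d) := by
      simp [PySem.Int.mod?, PySem.Int.mod, hd]
    rw [hmod]
    have hsub : pvHelperA false (g - d) (n0 :: ds.reverse) = some (pvReach false ds (g - d) n0) :=
      ih (g - d) n0 hall'
    simp only [pvReach, pvBPreds]
    by_cases hm : PySem.Int.mod g d = 0
    · have hdiv := ih (PySem.Int.floordiv g d) n0 hall'
      cases hr1 : pvReach false ds (PySem.Int.floordiv g d) n0 <;>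
      cases hr2 : pvReach false ds (g - d) n0 <;>
        simp [hdiv, hsub, hd, hm, hr1, hr2]
    · cases hr2 : pvReach false ds (g - d) n0 <;>
        simp [hsub, hd, hm, hr2]

-- the C = true run returns under pvSafeT: every crash pair met is excused by an
-- earlier crash-free success branch, so A's short-circuiting returns True first
lemma pvHelperA_true_eq_reach :
    ∀ (ds : List Int) (g n0 : Int),
    (ds.all fun d => d != 0) = true → pvSafeT n0 [g] ds = true →
    pvHelperA true g (n0 :: ds.reverse) = some (pvReach true ds g n0) := by
  intro ds
  induction ds with
  | nil =>
    intro g n0 _ _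
    rw [show (([] : List Int).reverse) = [] from rfl]
    conv_lhs => rw [pvHelperA.eq_def]
    dsimp only
    simp only [pvReach]
    by_cases h : g = n0
    · simp [h]
    · simp [h, sub_eq_zero]
  | cons d ds ih =>
    intro g n0 hall hsafe
    simp only [List.all_cons, Bool.and_eq_true] at hall
    obtain ⟨hd0, hall'⟩ := hall
    have hd : d ≠ 0 := by simpa using hd0
    simp only [pvSafeT, Bool.and_eq_true, List.all_eq_true, List.mem_singleton,
      forall_eq, Bool.or_eq_true, Bool.not_eq_true'] at hsafe
    obtain ⟨hce, hsafe'⟩ := hsafe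
    rw [show ([g].flatMap (pvPreds d)) = pvPreds d g by simp] at hsafe'
    have hsafeMem : ∀ y ∈ pvPreds d g, pvSafeT n0 [y] ds = true := by
      intro y hy
      refine pvSafeT_mono n0 ds (pvPreds d g) [y] ?_ hsafe'
      intro x hx; simp only [List.mem_singleton] at hx; exact hx ▸ hy
    rw [show (d :: ds).reverse = ds.reverse ++ [d] by simp,
      show n0 :: (ds.reverse ++ [d]) = (n0 :: ds.reverse) ++ [d] from rfl,
      pvHelperA_concat true g d (n0 :: ds.reverse) (by simp)]
    have hmod : PySem.Int.mod? g d = some (PySem.Int.mod g d) := by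
      simp [PySem.Int.mod?, PySem.Int.mod, hd]
    rw [hmod]
    have hsub : pvHelperA true (g - d) (n0 :: ds.reverse) = some (pvReach true ds (g - d) n0) :=
      ih (g - d) n0 hall' (hsafeMem _ (by simp [pvPreds]))
    rcases hce with hncg | hexc
    · -- no crash pair at this node: same argument as the fully-safe lemma
      simp only [pvCrash] at hncg
      simp only [pvReach, pvBPreds]
      by_cases hm : PySem.Int.mod g d = 0
      · have hdiv : pvHelperA true (PySem.Int.floordiv g d) (n0 :: ds.reverse)
            = some (pvReach true ds (PySem.Int.floordiv g d) n0) :=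
          ih _ n0 hall' (hsafeMem _ (by simp [pvPreds, hd, hm]))
        by_cases hic : PySem.List.slice (PySem.Int.toChars g)
            (some (-((PySem.Int.toChars d).length : Int))) none = PySem.Int.toChars d
        · rcases hde : PySem.Int.ofChars? (PySem.List.slice (PySem.Int.toChars g) none
              (some (-((PySem.Int.toChars d).length : Int)))) with _ | v
          · exfalso
            rw [hic] at hncg
            simp [hde] at hncg
          · have hv : pvHelperA true v (n0 :: ds.reverse) = some (pvReach true ds v n0) :=
              ih v n0 hall' (hsafeMem _ (by simp [pvPreds, hic, hde]))
            cases hr1 : pvReach true ds (PySem.Int.floordiv g d) n0 <;>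
            cases hr2 : pvReach true ds (g - d) n0 <;>
            cases hr3 : pvReach true ds v n0 <;>
              simp [pvIsConcatenated, pvDeconcatenation?, hic, hde, hdiv, hsub, hv, hd, hm,
                hr1, hr2, hr3]
        · cases hr1 : pvReach true ds (PySem.Int.floordiv g d) n0 <;>
          cases hr2 : pvReach true ds (g - d) n0 <;>
            simp [pvIsConcatenated, hic, hdiv, hsub, hd, hm, hr1, hr2]
      · by_cases hic : PySem.List.slice (PySem.Int.toChars g)
            (some (-((PySem.Int.toChars d).length : Int))) none = PySem.Int.toChars d
        · rcases hde : PySem.Int.ofChars? (PySem.List.slice (PySem.Int.toChars g) none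
              (some (-((PySem.Int.toChars d).length : Int)))) with _ | v
          · exfalso
            rw [hic] at hncg
            simp [hde] at hncg
          · have hv : pvHelperA true v (n0 :: ds.reverse) = some (pvReach true ds v n0) :=
              ih v n0 hall' (hsafeMem _ (by simp [pvPreds, hic, hde]))
            cases hr2 : pvReach true ds (g - d) n0 <;>
            cases hr3 : pvReach true ds v n0 <;>
              simp [pvIsConcatenated, pvDeconcatenation?, hic, hde, hsub, hv, hd, hm,
                hr2, hr3]
        · cases hr2 : pvReach true ds (g - d) n0 <;>
            simp [pvIsConcatenated, hic, hsub, hd, hm, hr2]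
    · -- crash pair possibly present, but excused: A returns True before the check
      simp only [pvExcuse, Bool.or_eq_true, Bool.and_eq_true, Bool.not_eq_true',
        beq_iff_eq] at hexc
      rcases hexc with ⟨⟨hm, hr1⟩, hs1⟩ | ⟨⟨hds, hr2⟩, hs2⟩
      · -- the ÷ child succeeds through a crash-free subtree
        have hdiv : pvHelperA true (PySem.Int.floordiv g d) (n0 :: ds.reverse)
            = some (pvReach true ds (PySem.Int.floordiv g d) n0) :=
          pvHelperA_eq_reach true ds _ n0 hall' hs1
        have hRtrue : pvReach true (d :: ds) g n0 = true := by
          simp only [pvReach, List.any_eq_true]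
          exact ⟨PySem.Int.floordiv g d, by simp [pvBPreds, hd, hm], hr1⟩
        rw [hRtrue]
        simp [hm, hdiv, hr1]
      · -- the − child succeeds crash-free; the ÷ subtree (if entered) is crash-free
        have hsub' : pvHelperA true (g - d) (n0 :: ds.reverse) = some true := by
          rw [pvHelperA_eq_reach true ds _ n0 hall' hs2, hr2]
        have hRtrue : pvReach true (d :: ds) g n0 = true := by
          simp only [pvReach, List.any_eq_true]
          exact ⟨g - d, by simp [pvBPreds], hr2⟩
        rw [hRtrue]
        by_cases hm : PySem.Int.mod g d = 0
        · have hsdiv : pvSafe [PySem.Int.floordiv g d] ds = true := by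
            rcases hds with hmf | hsafe
            · simp [hm] at hmf
            · exact hsafe
          have hdiv : pvHelperA true (PySem.Int.floordiv g d) (n0 :: ds.reverse)
              = some (pvReach true ds (PySem.Int.floordiv g d) n0) :=
            pvHelperA_eq_reach true ds _ n0 hall' hsdiv
          cases hr1 : pvReach true ds (PySem.Int.floordiv g d) n0 <;>
            simp [hm, hdiv, hsub', hr1]
        · simp [hm, hsub']

lemma pv_row_eq (s : Int × Int) (result p1 : Int) (ptail : List Int)
    (hall : (ptail.all fun p => p != 0) = true)
    (hok : (pvReach false ptail.reverse result p1 || pvSafeT p1 [result] ptail.reverse) = true) :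
    (match pvHelperA false result (p1 :: ptail) with
     | some true => (s.1 + result, s.2 + result)
     | some false =>
       match pvHelperA true result (p1 :: ptail) with
       | some true => (s.1, s.2 + result)
       | _ => s
     | _ => s)
    = (if pvCanMake false result (p1 :: ptail) then (s.1 + result, s.2 + result)
       else if pvCanMake true result (p1 :: ptail) then (s.1, s.2 + result) else s) := by
  have hallr : (ptail.reverse.all fun p => p != 0) = true := by simpa [List.all_reverse] using hall
  have hF : pvHelperA false result (p1 :: ptail) = some (pvReach false ptail.reverse result p1) := by
    have h := pvHelperA_false_eq_reach ptail.reverse result p1 hallr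
    rwa [List.reverse_reverse] at h
  have hBF : pvCanMake false result (p1 :: ptail) = pvReach false ptail.reverse result p1 :=
    pvCanMake_eq_reach false result p1 ptail
  cases hrF : pvReach false ptail.reverse result p1
  · have hsafeT : pvSafeT p1 [result] ptail.reverse = true := by
      simpa [hrF] using hok
    have hT : pvHelperA true result (p1 :: ptail) = some (pvReach true ptail.reverse result p1) := by
      have h := pvHelperA_true_eq_reach ptail.reverse result p1 hallr hsafeT
      rwa [List.reverse_reverse] at h
    have hBT : pvCanMake true result (p1 :: ptail) = pvReach true ptail.reverse result p1 :=
      pvCanMake_eq_reach true result p1 ptail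
    rw [hF, hrF, hBF, hrF, hT, hBT]
    cases pvReach true ptail.reverse result p1 <;> simp
  · rw [hF, hrF, hBF, hrF]
    simp

-- ===== VERDICT =====
theorem fast_solve_spec : Claim_equal_fast_solve := by
  intro rows _ hpre
  unfold Spec_fast_solve fast_solve fast_solve_alt
  unfold Pre_fast_solve at hpre
  rw [List.all_eq_true] at hpre
  apply PySem.List.foldl_congr_mem
  intro s row hrow
  have h := hpre row hrow
  match row with
  | [] => simp at h
  | [r] => simp at h
  | result :: p1 :: ptail =>
    simp only [Bool.and_eq_true] at h
    exact pv_row_eq s result p1 ptail h.1 h.2
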